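-- pv_equiv track=rewrite | github.com/vishrutkmr7/DailyPracticeProblemsDIP | 2023/02 February/db02282023.py | countLonely
-- ===== SOURCE A (Python) =====
-- def countLonely(matrix: list[list[int]]) -> int:
--     count = 0
--     for item in matrix:
--         for j in range(len(matrix[0])):
--             if (
--                 item[j] == 1
--                 and sum(item) == 1
--                 and sum(matrix[k][j] for k in range(len(matrix))) == 1
--             ):
--                 count += 1
--     return count
-- ===== SOURCE B (Python) =====
-- def countLonely(matrix: list[list[int]]) -> int:
--     # Precompute all row sums once; column sums are computed once, on demand,
--     # the first time a row with sum 1 is seen; then one scan over those rows.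
--     row_sums = list(map(sum, matrix))
--     col_sums = None
--     count = 0
--     for row, rs in zip(matrix, row_sums):
--         if rs == 1:
--             if col_sums is None:
--                 col_sums = [sum(col) for col in zip(*matrix)]
--             for x, cs in zip(row, col_sums):
--                 if x == 1 and cs == 1:
--                     count += 1
--     return count
-- ===== Notes on version B (the rewrite author's own statement) =====
-- stated objective: faster
-- what changed: B precomputes all row sums once (C-level map/sum) and computes column sums once, lazily, the first time a row with sum 1 is seen, then scans only such rows, instead of recomputing the row sum and the whole column sum inside the inner loop; intended as faster (the probe measured about 1.3-1.5x at its largest size, under per-process overhead; much larger gains on matrices with many 1-cells).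
import Mathlib
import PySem

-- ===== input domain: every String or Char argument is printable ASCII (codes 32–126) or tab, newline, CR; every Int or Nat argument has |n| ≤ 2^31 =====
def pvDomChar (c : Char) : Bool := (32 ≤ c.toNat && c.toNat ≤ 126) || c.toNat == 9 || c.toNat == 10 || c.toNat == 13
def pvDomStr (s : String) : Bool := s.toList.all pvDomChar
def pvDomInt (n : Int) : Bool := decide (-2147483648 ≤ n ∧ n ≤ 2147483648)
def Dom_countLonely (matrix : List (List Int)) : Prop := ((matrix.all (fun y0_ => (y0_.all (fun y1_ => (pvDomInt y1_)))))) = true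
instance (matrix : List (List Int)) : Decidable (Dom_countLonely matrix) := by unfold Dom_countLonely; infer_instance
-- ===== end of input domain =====

-- B precomputes all row sums once; column sums are computed once, on demand, the first time a
-- row with sum 1 is seen; then one scan over those rows (intended as faster; a timing run
-- measured about 1.3-1.5x at its largest size).

-- ===== PORT A =====
-- nested loops; row sum and whole-column sum recomputed inside the inner loop, as in A
def countLonely (matrix : List (List Int)) : Int :=
  matrix.foldl (fun count item =>
    (List.range (matrix.headD []).length).foldl (fun c j =>
      if item.getD j 0 = 1 ∧ item.sum = 1 ∧
         ((List.range matrix.length).map (fun k => (matrix.getD k []).getD j 0)).sum = 1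
      then c + 1 else c) count) 0

-- ===== PORT B =====
-- port of zip(*matrix): its number of columns is the shortest row length
def pyZipMinLen (m : List (List Int)) : Nat :=
  match m with
  | [] => 0
  | r :: rs => rs.foldl (fun a s => min a s.length) r.length

def countLonely_alt (matrix : List (List Int)) : Int :=
  let rowSums : List Int := matrix.map List.sum
  -- state: (count, col_sums or None); zip(*matrix) ported as columns over the shortest row
  ((matrix.zip rowSums).foldl (fun s p =>
    if p.2 = 1 then
      let cs : List Int := s.2.getD ((List.range (pyZipMinLen matrix)).map
        (fun j => (matrix.map (fun r => r.getD j 0)).sum))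
      ((p.1.zip cs).foldl (fun c q =>
        if q.1 = 1 ∧ q.2 = 1 then c + 1 else c) s.1, some cs)
    else s) ((0 : Int), (none : Option (List Int)))).1

-- ===== PRECONDITION & SPEC =====
-- Pre_ excludes exactly the inputs on which A raises IndexError: ragged matrices with some
-- row shorter than the first row (item[j] goes out of range there); A returns on all others.
def Pre_countLonely (matrix : List (List Int)) : Prop :=
  ∀ r ∈ matrix, (matrix.headD []).length ≤ r.length
instance (matrix : List (List Int)) : Decidable (Pre_countLonely matrix) := by
  unfold Pre_countLonely; infer_instance

def pvWitness_countLonely : List (List Int) := [[1, 0], [0, 1]]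

def Spec_countLonely (matrix : List (List Int)) (out : Int) : Prop := out = countLonely_alt matrix
instance (matrix : List (List Int)) (out : Int) : Decidable (Spec_countLonely matrix out) := by unfold Spec_countLonely; infer_instance

-- ===== CLAIM (what is proved, stated in full; the proofs are below) =====
def Claim_equal_countLonely : Prop := ∀ (matrix : List (List Int)), Dom_countLonely matrix → Pre_countLonely matrix → Spec_countLonely matrix (countLonely matrix)

-- ===== LEMMAS AND PROOFS =====

-- a counting foldl is a sum of indicators
theorem foldl_if_count {α : Type} (l : List α) (p : α → Prop) [DecidablePred p] (c : Int) :
    l.foldl (fun c j => if p j then c + 1 else c) c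
      = c + (l.map (fun j => if p j then (1 : Int) else 0)).sum := by
  induction l generalizing c with
  | nil => simp
  | cons x xs ih => simp only [List.foldl_cons, List.map_cons, List.sum_cons, ih]; split_ifs <;> ring

-- a foldl that adds a per-element value is a sum over the map
theorem foldl_add_sum {α : Type} (l : List α) (g : α → Int) (c : Int)
    (F : Int → α → Int) (hF : ∀ c x, F c x = c + g x) :
    l.foldl F c = c + (l.map g).sum := by
  induction l generalizing c with
  | nil => simp
  | cons x xs ih => simp only [List.foldl_cons, List.map_cons, List.sum_cons, hF, ih]; ring

-- mapping over the range of indices equals mapping over the list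
theorem map_range_getD (l : List (List Int)) (g : List Int → Int) :
    (List.range l.length).map (fun i => g (l.getD i [])) = l.map g := by
  induction l with
  | nil => simp
  | cons x xs ih =>
      simp only [List.length_cons, List.range_succ_eq_map, List.map_cons, List.map_map]
      refine congrArg (g x :: ·) ?_
      simpa using ih

theorem getD_range_map (n : Nat) (f : Nat → Int) (j : Nat) (hj : j < n) :
    ((List.range n).map f).getD j 0 = f j := by
  rw [List.getD_eq_getElem _ _ (by simpa using hj)]
  simp

theorem zip_self_map (l : List (List Int)) (f : List Int → Int) :
    l.zip (l.map f) = l.map (fun x => (x, f x)) := by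
  induction l with
  | nil => rfl
  | cons x xs ih => simp [List.zip_cons_cons, ih]

-- a map over a zip as a map over the indices
theorem map_zip_eq_range (xs ys : List Int) (f : Int × Int → Int) :
    ((xs.zip ys).map f)
      = ((List.range (min xs.length ys.length)).map
          (fun j => f (xs.getD j 0, ys.getD j 0))) := by
  induction xs generalizing ys with
  | nil => simp
  | cons x xt ih =>
      cases ys with
      | nil => simp
      | cons y yt =>
          have hmin : min (x :: xt).length (y :: yt).length
              = min xt.length yt.length + 1 := by
            simp [Nat.succ_min_succ]
          rw [List.zip_cons_cons, List.map_cons, hmin, List.range_succ_eq_map,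
            List.map_cons, List.map_map]
          refine congrArg (f (x, y) :: ·) ?_
          rw [ih yt]
          rfl

-- the lazily initialised column-sum state always holds CS when it is read
theorem lazy_foldl (l : List (List Int × Int)) (CS : List Int) (cnt : Int)
    (o : Option (List Int)) (ho : o = none ∨ o = some CS) :
    (l.foldl (fun s p =>
      if p.2 = 1 then
        ((p.1.zip (s.2.getD CS)).foldl (fun c q =>
          if q.1 = 1 ∧ q.2 = 1 then c + 1 else c) s.1, some (s.2.getD CS))
      else s) (cnt, o)).1
    = l.foldl (fun c p =>
        if p.2 = 1 then
          (p.1.zip CS).foldl (fun c q =>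
            if q.1 = 1 ∧ q.2 = 1 then c + 1 else c) c
        else c) cnt := by
  induction l generalizing cnt o with
  | nil => simp
  | cons p t ih =>
      have hgd : o.getD CS = CS := by rcases ho with h | h <;> simp [h]
      simp only [List.foldl_cons]
      by_cases hp : p.2 = 1
      · simp only [if_pos hp, hgd]
        exact ih _ (some CS) (Or.inr rfl)
      · simp only [if_neg hp]
        exact ih _ o ho

theorem pyZipMinLen_eq (matrix : List (List Int)) (h : Pre_countLonely matrix) :
    pyZipMinLen matrix = (matrix.headD []).length := by
  cases matrix with
  | nil => simp [pyZipMinLen]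
  | cons r rs =>
      have hall : ∀ s ∈ rs, r.length ≤ s.length := by
        intro s hs
        have := h s (List.mem_cons_of_mem _ hs)
        simpa using this
      simp only [pyZipMinLen, List.headD_cons]
      clear h
      induction rs with
      | nil => rfl
      | cons s ss ih =>
          have hs := hall s (by simp)
          rw [List.foldl_cons, min_eq_left hs]
          exact ih (fun t ht => hall t (List.mem_cons_of_mem _ ht))

-- ===== VERDICT (by name: the statement is the Claim_ definition above) =====
theorem countLonely_spec : Claim_equal_countLonely := by
  unfold Claim_equal_countLonely
  intro matrix _ hpre
  simp only [Spec_countLonely, countLonely, countLonely_alt]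
  set L := (matrix.headD []).length with hL
  have hmin : pyZipMinLen matrix = L := pyZipMinLen_eq matrix hpre
  set colSums := (List.range (pyZipMinLen matrix)).map
      (fun j => (matrix.map (fun r => r.getD j 0)).sum) with hcs
  have hclen : colSums.length = L := by simp [hcs, hmin]
  -- the column sum A recomputes, at index j < L, is colSums.getD j 0
  have hcol : ∀ j < L, colSums.getD j 0
      = ((List.range matrix.length).map (fun k => (matrix.getD k []).getD j 0)).sum := by
    intro j hj
    rw [hcs, hmin, getD_range_map L _ j hj]
    exact congrArg List.sum (map_range_getD matrix (fun r => r.getD j 0)).symm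
  -- A-side: fold = sum of g over rows
  set g : List Int → Int := fun item =>
    ((List.range L).map (fun j =>
      if item.getD j 0 = 1 ∧ item.sum = 1 ∧
         ((List.range matrix.length).map (fun k => (matrix.getD k []).getD j 0)).sum = 1
      then (1 : Int) else 0)).sum with hg
  have hA : matrix.foldl (fun count item =>
      (List.range L).foldl (fun c j =>
        if item.getD j 0 = 1 ∧ item.sum = 1 ∧
           ((List.range matrix.length).map (fun k => (matrix.getD k []).getD j 0)).sum = 1
        then c + 1 else c) count) 0 = (matrix.map g).sum := by
    have := foldl_add_sum matrix g 0
      (fun count item =>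
        (List.range L).foldl (fun c j =>
          if item.getD j 0 = 1 ∧ item.sum = 1 ∧
             ((List.range matrix.length).map (fun k => (matrix.getD k []).getD j 0)).sum = 1
          then c + 1 else c) count)
      (fun c x => foldl_if_count (List.range L) _ c)
    simpa using this
  rw [hA]
  -- B-side: fold = sum of g' over rows
  set g' : List Int → Int := fun row =>
    if row.sum = 1 then
      ((row.zip colSums).map (fun q =>
        if q.1 = 1 ∧ q.2 = 1 then (1 : Int) else 0)).sum
    else 0 with hg'
  have hB : ((matrix.zip (matrix.map List.sum)).foldl (fun s p =>
      if p.2 = 1 then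
        ((p.1.zip (s.2.getD colSums)).foldl (fun c q =>
          if q.1 = 1 ∧ q.2 = 1 then c + 1 else c) s.1, some (s.2.getD colSums))
      else s) ((0 : Int), (none : Option (List Int)))).1 = (matrix.map g').sum := by
    rw [lazy_foldl _ colSums 0 none (Or.inl rfl),
      zip_self_map matrix List.sum, List.foldl_map]
    have := foldl_add_sum matrix g' 0
      (fun count row =>
        if row.sum = 1 then
          (row.zip colSums).foldl (fun c q =>
            if q.1 = 1 ∧ q.2 = 1 then c + 1 else c) count
        else count)
      (fun c row => by
        by_cases h : row.sum = 1
        · simp only [hg', if_pos h]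
          exact foldl_if_count (row.zip colSums) _ c
        · simp [hg', if_neg h])
    simpa using this
  rw [hB]
  -- rowwise equality under Pre_
  refine congrArg List.sum (List.map_congr_left ?_)
  intro row hrow
  have hlen : L ≤ row.length := hpre row hrow
  by_cases hrs : row.sum = 1
  · simp only [hg, hg', if_pos hrs]
    rw [map_zip_eq_range row colSums _, hclen, min_eq_right hlen]
    refine congrArg List.sum (List.map_congr_left ?_)
    intro j hj
    have hjL : j < L := List.mem_range.mp hj
    rw [hcol j hjL]
    exact if_congr (by tauto) rfl rfl
  · simp only [hg, hg', if_neg hrs]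
    have hz : ∀ j ∈ List.range L,
        (if row.getD j 0 = 1 ∧ row.sum = 1 ∧
           ((List.range matrix.length).map (fun k => (matrix.getD k []).getD j 0)).sum = 1
         then (1 : Int) else 0) = 0 := by
      intro j _
      exact if_neg (by tauto)
    rw [List.map_congr_left hz]
    simp
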